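-- pv_equiv track=rewrite | github.com/Zhe-jiang/PRAISE | remove_multi_mapping.py | score_change
-- ===== SOURCE A (Python) =====
-- def score_change(score_cha, cigar_cha):
--
--     # if there is one deletion in cigar, score - 10
--     del_num_cha = 0
--     cig_num_cha = ''
--     len_cig_cha = len(cigar_cha)
--
--     for i in range(len_cig_cha):
--         if cigar_cha[i].isdigit():
--             cig_num_cha += cigar_cha[i]
--         else:
--             if cigar_cha[i] == 'D':
--                 del_num_cha += int(cig_num_cha)
--                 cig_num_cha = ''
--             else:
--                 cig_num_cha= ''
--
--     return (score_cha - 20 * del_num_cha)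
-- ===== SOURCE B (Python) =====
-- import re
--
--
-- def score_change(score_cha, cigar_cha):
--     # Tokenize the CIGAR into (digit-run, operator) pairs, then sum the
--     # lengths of the deletion ('D') operations.
--     total = 0
--     for num, op in re.findall(r'(\d*)(\D)', cigar_cha):
--         if op == 'D':
--             total += int(num)
--     return score_cha - 20 * total
-- ===== Notes on version B (the rewrite author's own statement) =====
-- stated objective: simpler
-- what changed: B replaces A's character-by-character scan with mutable digit-buffer state by a regex tokenization into (number, operator) pairs followed by a sum over the 'D' pairs.
import Mathlib
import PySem

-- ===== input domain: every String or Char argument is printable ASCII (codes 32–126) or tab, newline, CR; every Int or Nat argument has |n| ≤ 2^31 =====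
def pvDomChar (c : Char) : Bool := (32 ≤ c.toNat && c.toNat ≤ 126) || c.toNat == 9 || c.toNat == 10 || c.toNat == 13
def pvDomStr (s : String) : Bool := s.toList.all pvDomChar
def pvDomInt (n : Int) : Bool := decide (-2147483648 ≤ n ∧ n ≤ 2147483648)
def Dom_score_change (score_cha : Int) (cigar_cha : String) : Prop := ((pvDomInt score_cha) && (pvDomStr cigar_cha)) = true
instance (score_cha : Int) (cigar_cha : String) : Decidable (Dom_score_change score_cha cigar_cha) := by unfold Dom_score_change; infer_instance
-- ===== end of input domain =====

-- B replaces A's char-by-char scan with mutable digit-buffer state by a tokenize-into-(run, op)-pairs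
-- pass followed by a sum over the 'D' pairs; objective: simpler. Not faster (both one pass).

-- ===== PORT A =====
-- int('') raises ValueError in Python; Pre_ excludes exactly those inputs, so the getD 0 branch is never reached on Pre_.
def score_change (score_cha : Int) (cigar_cha : String) : Int :=
  let r := cigar_cha.toList.foldl
    (fun (st : Int × List Char) c =>
      if PySem.Chars.isdigit c then (st.1, st.2 ++ [c])
      else if c = 'D' then (st.1 + (PySem.Int.ofChars? st.2).getD 0, ([] : List Char))
      else (st.1, ([] : List Char)))
    (0, ([] : List Char))
  score_cha - 20 * r.1

-- ===== PORT B =====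
-- Tokenizer for re.findall(r'(\d*)(\D)', s): a maximal digit run plus the following non-digit char,
-- repeatedly; trailing digits with no operator yield no pair. On the ASCII domain \d = Chars.isdigit exactly.
def pvTokens (cs : List Char) : List (List Char × Char) :=
  if h : (cs.dropWhile PySem.Chars.isdigit) = [] then []
  else (cs.takeWhile PySem.Chars.isdigit, (cs.dropWhile PySem.Chars.isdigit).head h)
       :: pvTokens (cs.dropWhile PySem.Chars.isdigit).tail
termination_by cs.length
decreasing_by
  have h1 := List.length_dropWhile_le (p := PySem.Chars.isdigit) (l := cs)
  cases hd : cs.dropWhile PySem.Chars.isdigit with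
  | nil => exact absurd hd h
  | cons a l => simp [hd] at h1 ⊢; omega

-- int(num) raises ValueError in Python when the run is empty; Pre_ excludes those inputs.
def score_change_alt (score_cha : Int) (cigar_cha : String) : Int :=
  score_cha - 20 * ((pvTokens cigar_cha.toList).foldl
    (fun tot t => if t.2 = 'D' then tot + (PySem.Int.ofChars? t.1).getD 0 else tot) 0)

-- ===== PRECONDITION & SPEC =====
-- Pre_ excludes exactly the inputs on which Python raises ValueError (int('') in both A and B):
-- a 'D' at position 0 or a 'D' not immediately preceded by a digit.
def Pre_score_change (score_cha : Int) (cigar_cha : String) : Prop :=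
  ∀ i < cigar_cha.toList.length, cigar_cha.toList.getD i ' ' = 'D' →
    0 < i ∧ PySem.Chars.isdigit (cigar_cha.toList.getD (i - 1) ' ') = true
instance (score_cha : Int) (cigar_cha : String) : Decidable (Pre_score_change score_cha cigar_cha) := by
  unfold Pre_score_change; infer_instance

def pvWitness_score_change : Int × String := (7, "5M12D3M")

def Spec_score_change (score_cha : Int) (cigar_cha : String) (out : Int) : Prop := out = score_change_alt score_cha cigar_cha
instance (score_cha : Int) (cigar_cha : String) (out : Int) : Decidable (Spec_score_change score_cha cigar_cha out) := by unfold Spec_score_change; infer_instance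

-- ===== CLAIM (what is proved, stated in full; the proofs are below) =====
def Claim_equal_score_change : Prop := ∀ (score_cha : Int) (cigar_cha : String), Dom_score_change score_cha cigar_cha → Pre_score_change score_cha cigar_cha → Spec_score_change score_cha cigar_cha (score_change score_cha cigar_cha)

-- ===== LEMMAS AND PROOFS =====

theorem pv_witness_ok :
    Dom_score_change pvWitness_score_change.1 pvWitness_score_change.2 ∧
    Pre_score_change pvWitness_score_change.1 pvWitness_score_change.2 := by decide

theorem pv_splitAt (pre : List Char) (h : ∀ a ∈ pre, PySem.Chars.isdigit a = true)
    (c : Char) (hc : PySem.Chars.isdigit c = false) (cs : List Char) :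
    (pre ++ c :: cs).takeWhile PySem.Chars.isdigit = pre ∧
    (pre ++ c :: cs).dropWhile PySem.Chars.isdigit = c :: cs := by
  induction pre with
  | nil => simp [List.takeWhile, hc]
  | cons a l ih =>
      have ha : PySem.Chars.isdigit a = true := h a (by simp)
      have := ih (fun x hx => h x (by simp [hx]))
      simp [List.takeWhile, ha, this.1, this.2]

theorem pv_main (cs : List Char) : ∀ (pre : List Char) (del : Int),
    (∀ a ∈ pre, PySem.Chars.isdigit a = true) →
    (cs.foldl
      (fun (st : Int × List Char) c =>
        if PySem.Chars.isdigit c then (st.1, st.2 ++ [c])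
        else if c = 'D' then (st.1 + (PySem.Int.ofChars? st.2).getD 0, ([] : List Char))
        else (st.1, ([] : List Char)))
      (del, pre)).1
    = (pvTokens (pre ++ cs)).foldl
        (fun tot t => if t.2 = 'D' then tot + (PySem.Int.ofChars? t.1).getD 0 else tot) del := by
  induction cs with
  | nil =>
      intro pre del h
      have hd : pre.dropWhile PySem.Chars.isdigit = [] := by
        rw [List.dropWhile_eq_nil_iff]; intro x hx; exact h x hx
      simp [pvTokens, hd]
  | cons c cs ih =>
      intro pre del h
      by_cases hc : PySem.Chars.isdigit c = true
      · have : pre ++ c :: cs = (pre ++ [c]) ++ cs := by simp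
        rw [this]
        have := ih (pre ++ [c]) del (by
          intro a ha
          rcases List.mem_append.mp ha with h1 | h1
          · exact h a h1
          · simp at h1; subst h1; exact hc)
        simpa [List.foldl, hc] using this
      · have hc' : PySem.Chars.isdigit c = false := by simpa using hc
        obtain ⟨htw, hdw⟩ := pv_splitAt pre h c hc' cs
        rw [pvTokens]
        simp only [hdw, htw]
        simp only [List.head, List.tail, List.foldl]
        by_cases hD : c = 'D'
        · simp [hD]
          exact ih [] (del + (PySem.Int.ofChars? pre).getD 0) (by simp)
        · simp [hc', hD]
          exact ih [] del (by simp)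

-- ===== VERDICT (by name: the statement is the Claim_ definition above) =====
theorem score_change_spec : Claim_equal_score_change := by
  intro score_cha cigar_cha _ _
  unfold Spec_score_change score_change score_change_alt
  have := pv_main cigar_cha.toList [] 0 (by simp)
  simp only [List.nil_append] at this
  simp only [this]
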